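-- pv_equiv track=rewrite | github.com/KimDaeUng/py_algo | 개인문제/Programmers_Basic/스택-큐/다리를-지나는-트럭.py | solution
-- ===== SOURCE A (Python) =====
-- from collections import deque
-- from collections import deque
-- from collections import deque
--
-- def solution(bridge_length, weight, truck_weights):
--     bridge = deque(0 for _ in range(bridge_length))
--     total_weight = 0
--     step = 0
--     # pop(0)을 쓰는 것을 피하기 위해 reverse
--     truck_weights.reverse()
--
--     while truck_weights:
--         # bridge에서 첫 번째 원소 뺌
--         total_weight -= bridge.popleft()
--         # 남은 하중 + 현재 트럭 하중 > 교량 최대 하중: -> 더미 트럭 0 추가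
--         if total_weight + truck_weights[-1] > weight:
--             bridge.append(0)
--         # 새 트럭을 올릴 수 있는 경우
--         else:
--             truck = truck_weights.pop()
--             bridge.append(truck)
--             total_weight += truck
--         step += 1
--
--     # truck_weights에 대기중인 truck을 모두 올리면
--     # 가장 마지막으로 올린 트럭은 bridge의 제일 마지막에 위치하므로
--     # bridge의 길이만큼 더해줘야 bridge를 건너게됨
--     step += bridge_length
--
--     return step
-- ===== SOURCE B (Python) =====
-- from collections import deque
--
-- def solution(bridge_length, weight, truck_weights):
--     # Event-driven: track (entry_time, w) per truck on the bridge and jump time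
--     # straight to the next feasible entry instead of simulating every second.
--     q = deque()          # trucks on the bridge: (entry_time, w), entry times increasing
--     total = 0            # current load on the bridge
--     t = 0                # time of the last entry
--     for tw in truck_weights:
--         t += 1
--         # remove trucks that have already left the bridge by time t
--         while q and q[0][0] + bridge_length <= t:
--             total -= q.popleft()[1]
--         # load changes only when the front truck leaves: jump there
--         while total + tw > weight:
--             e, w0 = q.popleft()
--             t = e + bridge_length
--             total -= w0
--         q.append((t, tw))
--         total += tw
--     return t + bridge_length
-- ===== Notes on version B (the rewrite author's own statement) =====
-- stated objective: faster
-- what changed: A simulates the bridge second by second with a length-L deque padded with zeros; B keeps an event queue of (entry_time, weight) pairs and jumps time directly to each truck's earliest feasible entry (the load only changes when the front truck exits), doing O(1) amortized queue work per truck instead of per simulated second.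
-- outside the precondition, e.g. on solution(2, 0, [-5, 1]): A returns 4, B returns 4; on solution(0, 5, [1]): A raises IndexError, B returns 1; on solution(1, 0, [1]): A does not finish within the time limit, B raises IndexError
import Mathlib
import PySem

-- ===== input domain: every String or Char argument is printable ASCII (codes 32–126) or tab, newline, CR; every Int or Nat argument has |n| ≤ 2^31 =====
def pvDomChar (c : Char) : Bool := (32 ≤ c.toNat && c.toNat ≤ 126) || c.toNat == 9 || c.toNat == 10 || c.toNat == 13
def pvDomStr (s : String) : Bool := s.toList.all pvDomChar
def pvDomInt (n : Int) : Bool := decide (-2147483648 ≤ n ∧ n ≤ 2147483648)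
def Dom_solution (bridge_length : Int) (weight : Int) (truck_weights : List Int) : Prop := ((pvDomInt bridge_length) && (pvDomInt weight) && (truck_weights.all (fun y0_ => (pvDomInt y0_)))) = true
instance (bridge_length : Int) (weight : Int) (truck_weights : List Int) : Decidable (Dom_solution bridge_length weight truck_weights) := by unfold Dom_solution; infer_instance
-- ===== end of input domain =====

-- B replaces A's second-by-second bridge simulation by an event queue of (entry_time, weight)
-- pairs that jumps time directly to each truck's earliest feasible entry, doing constant
-- amortized queue work per truck instead of work per simulated second (objective: faster).
-- A mutates its truck_weights argument in place (reverses and empties it); B does not: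
-- the equivalence proved here is about the RETURN value only.

-- ===== PORT A =====
-- A's while loop; the fuel counter is a totality guard only (under Pre_ the fuel chosen
-- in `solution` is proven sufficient, so the 0-fuel branch is never reached).
def aLoop (bl wt : Int) : Nat → List Int → Int → List Int → Int → Int
  | 0, _bridge, _total, _ts, step => step
  | fuel+1, bridge, total, ts, step =>
    match ts with
    | [] => step + bl                    -- while loop done; step += bridge_length; return
    | _ :: _ =>
      match bridge with
      | [] => step                       -- Python: IndexError on popleft (excluded by Pre_)
      | front :: rest =>
        let total' := total - front      -- total_weight -= bridge.popleft()
        match ts.getLast? with           -- truck_weights[-1] (ts nonempty here)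
        | none => step
        | some tw =>
          if total' + tw > wt then
            aLoop bl wt fuel (rest ++ [0]) total' ts (step + 1)
          else
            aLoop bl wt fuel (rest ++ [tw]) (total' + tw) ts.dropLast (step + 1)

def solution (bridge_length : Int) (weight : Int) (truck_weights : List Int) : Int :=
  -- deque(0 for _ in range(bridge_length)): empty for bridge_length ≤ 0, hence toNat
  aLoop bridge_length weight (truck_weights.length * bridge_length.toNat + 1)
    (List.replicate bridge_length.toNat 0) 0 truck_weights.reverse 0

-- ===== PORT B =====
-- drop the trucks that have already left the bridge by time t
def bDrop (bl t : Int) : List (Int × Int) → Int → List (Int × Int) × Int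
  | [], total => ([], total)
  | (e, w0) :: rest, total =>
    if e + bl ≤ t then bDrop bl t rest (total - w0) else ((e, w0) :: rest, total)

-- while total + tw > wt: pop the front truck and jump t to its exit time
def bJump (bl wt tw : Int) : List (Int × Int) → Int → Int → Int × List (Int × Int) × Int
  | q, total, t =>
    if total + tw > wt then
      match q with
      | [] => (t, [], total)             -- Python: IndexError on popleft (excluded by Pre_)
      | (e, w0) :: rest => bJump bl wt tw rest (total - w0) (e + bl)
    else (t, q, total)
  termination_by q _ _ => q.length

def bLoop (bl wt : Int) : List Int → List (Int × Int) → Int → Int → Int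
  | [], _q, _total, t => t + bl
  | tw :: rest, q, total, t =>
    let p := bDrop bl (t + 1) q total
    let r := bJump bl wt tw p.1 p.2 (t + 1)
    bLoop bl wt rest (r.2.1 ++ [(r.1, tw)]) (r.2.2 + tw) r.1

def solution_alt (bridge_length : Int) (weight : Int) (truck_weights : List Int) : Int :=
  bLoop bridge_length weight truck_weights [] 0 0

-- ===== PRECONDITION & SPEC =====
-- Pre_ excludes the inputs on which A does not return normally: with a nonempty truck
-- list, bridge_length ≤ 0 makes A's popleft raise IndexError, and a truck heavier than
-- `weight` makes A's while loop run forever because that truck can never board (on the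
-- rare such inputs where a negative net load still lets it board, A returns and agrees
-- with B, e.g. (2, 0, [-5, 1]) where both return 4).
def Pre_solution (bridge_length : Int) (weight : Int) (truck_weights : List Int) : Prop :=
  (truck_weights = [] ∨ 1 ≤ bridge_length) ∧ ∀ tw ∈ truck_weights, tw ≤ weight
instance (bridge_length : Int) (weight : Int) (truck_weights : List Int) : Decidable (Pre_solution bridge_length weight truck_weights) := by unfold Pre_solution; infer_instance

def pvWitness_solution : Int × Int × List Int := (2, 10, [7, 4, 5, 6])

def Spec_solution (bridge_length : Int) (weight : Int) (truck_weights : List Int) (out : Int) : Prop := out = solution_alt bridge_length weight truck_weights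
instance (bridge_length : Int) (weight : Int) (truck_weights : List Int) (out : Int) : Decidable (Spec_solution bridge_length weight truck_weights out) := by unfold Spec_solution; infer_instance

-- ===== CLAIM (what is proved, stated in full; the proofs are below) =====
def Claim_equal_solution : Prop := ∀ (bridge_length : Int) (weight : Int) (truck_weights : List Int), Dom_solution bridge_length weight truck_weights → Pre_solution bridge_length weight truck_weights → Spec_solution bridge_length weight truck_weights (solution bridge_length weight truck_weights)

-- ===== LEMMAS AND PROOFS =====

-- `rep t0 m q` reconstructs A's bridge deque for the time window [t0, t0+m-1] from
-- B's queue q of (entry_time, weight) pairs (entry times strictly increasing).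
def rep (t0 : Int) : Nat → List (Int × Int) → List Int
  | 0, _ => []
  | m+1, [] => 0 :: rep (t0+1) m []
  | m+1, (e, w) :: q' =>
    if e = t0 then w :: rep (t0+1) m q' else 0 :: rep (t0+1) m ((e, w) :: q')

lemma rep_congr {t0 t1 : Int} (m : Nat) (q : List (Int × Int)) (h : t0 = t1) :
    rep t0 m q = rep t1 m q := by rw [h]

lemma rep_nil (m : Nat) : ∀ t0 : Int, rep t0 m [] = List.replicate m 0 := by
  induction m with
  | zero => intro t0; rfl
  | succ m ih => intro t0; simp [rep, ih, List.replicate_succ]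

lemma rep_nil_succ (t0 : Int) (m : Nat) : rep t0 (m+1) [] = 0 :: rep (t0+1) m [] := rfl

lemma rep_cons_eq (t0 : Int) (m : Nat) (w : Int) (q' : List (Int × Int)) :
    rep t0 (m+1) ((t0, w) :: q') = w :: rep (t0+1) m q' := by
  show (if t0 = t0 then w :: rep (t0+1) m q' else 0 :: rep (t0+1) m ((t0, w) :: q')) = _
  rw [if_pos rfl]

lemma rep_cons_ne (t0 : Int) (m : Nat) (e w : Int) (q' : List (Int × Int)) (h : ¬ e = t0) :
    rep t0 (m+1) ((e, w) :: q') = 0 :: rep (t0+1) m ((e, w) :: q') := by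
  show (if e = t0 then w :: rep (t0+1) m q' else 0 :: rep (t0+1) m ((e, w) :: q')) = _
  rw [if_neg h]

lemma rep_head {t0 : Int} {m : Nat} {q : List (Int × Int)}
    (h : ∀ p ∈ q, t0 + 1 ≤ p.1) : rep t0 (m+1) q = 0 :: rep (t0+1) m q := by
  cases q with
  | nil => rfl
  | cons p q' =>
    obtain ⟨e, w⟩ := p
    have he := h (e, w) (List.mem_cons_self)
    simp only at he
    exact rep_cons_ne t0 m e w q' (by omega)

lemma rep_entry (t0 : Int) (m : Nat) (w : Int) (q' : List (Int × Int)) :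
    rep t0 (m+1) ((t0, w) :: q') = w :: rep (t0+1) m q' := rep_cons_eq t0 m w q'

lemma rep_pad (m : Nat) : ∀ (t0 : Int) (q : List (Int × Int)),
    (∀ p ∈ q, p.1 < t0 + m) → rep t0 (m+1) q = rep t0 m q ++ [0] := by
  induction m with
  | zero =>
    intro t0 q h
    cases q with
    | nil => rfl
    | cons p q' =>
      obtain ⟨e, w⟩ := p
      have he := h (e, w) (List.mem_cons_self)
      simp only [Nat.cast_zero, add_zero] at he
      rw [rep_cons_ne t0 0 e w q' (by omega)]
      rfl
  | succ m ih =>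
    intro t0 q h
    cases q with
    | nil =>
      rw [rep_nil_succ t0 (m+1), rep_nil_succ t0 m,
        ih (t0+1) [] (by simp), List.cons_append]
    | cons p q' =>
      obtain ⟨e, w⟩ := p
      have he := h (e, w) (List.mem_cons_self)
      by_cases hc : e = t0
      · subst hc
        rw [rep_cons_eq e (m+1) w q', rep_cons_eq e m w q',
          ih (e+1) q' (by intro p hp; have := h p (List.mem_cons_of_mem _ hp); push_cast at this ⊢; omega),
          List.cons_append]
      · rw [rep_cons_ne t0 (m+1) e w q' hc, rep_cons_ne t0 m e w q' hc,
          ih (t0+1) ((e, w) :: q') (by intro p hp; have := h p hp; push_cast at this ⊢; omega),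
          List.cons_append]

lemma rep_append (m : Nat) : ∀ (t0 : Int) (q : List (Int × Int)) (w : Int),
    q.Pairwise (fun a b => a.1 < b.1) →
    (∀ p ∈ q, t0 ≤ p.1 ∧ p.1 < t0 + m) →
    rep t0 (m+1) (q ++ [(t0 + (m : Int), w)]) = rep t0 m q ++ [w] := by
  induction m with
  | zero =>
    intro t0 q w _ h
    cases q with
    | nil =>
      simp only [List.nil_append, Nat.cast_zero, add_zero]
      rw [rep_cons_eq t0 0 w []]
      rfl
    | cons p q' =>
      obtain ⟨e, we⟩ := p
      have he := h (e, we) (List.mem_cons_self)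
      simp only [Nat.cast_zero, add_zero] at he
      omega
  | succ m ih =>
    intro t0 q w hpw h
    cases q with
    | nil =>
      have hne : ¬ (t0 + (((m+1 : Nat)) : Int) = t0) := by push_cast; omega
      simp only [List.nil_append]
      rw [rep_cons_ne t0 (m+1) (t0 + (((m+1 : Nat)) : Int)) w [] hne]
      rw [show (t0 + (((m+1 : Nat)) : Int)) = (t0 + 1) + ((m : Nat) : Int) from by push_cast; ring]
      rw [show ([((t0+1) + ((m : Nat) : Int), w)] : List (Int × Int)) = [] ++ [((t0+1) + ((m : Nat) : Int), w)] from by simp]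
      rw [ih (t0+1) [] w (by simp) (by simp)]
      rw [rep_nil_succ t0 m, List.cons_append]
    | cons p q' =>
      obtain ⟨e, we⟩ := p
      have he := h (e, we) (List.mem_cons_self)
      have htail : ∀ p' ∈ q', e < p'.1 := (List.pairwise_cons.mp hpw).1
      by_cases hc : e = t0
      · subst hc
        simp only [List.cons_append]
        rw [rep_cons_eq e (m+1) we, rep_cons_eq e m we]
        rw [show (e + (((m+1 : Nat)) : Int)) = (e + 1) + ((m : Nat) : Int) from by push_cast; ring]
        rw [ih (e+1) q' w (List.pairwise_cons.mp hpw).2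
          (by intro p' hp'
              have h1 := htail p' hp'
              have h2 := h p' (List.mem_cons_of_mem _ hp')
              push_cast at h2 ⊢; omega)]
        rw [List.cons_append]
      · have he1 : t0 + 1 ≤ e := by
          have := he.1; omega
        simp only [List.cons_append]
        rw [rep_cons_ne t0 (m+1) e we _ hc, rep_cons_ne t0 m e we _ hc]
        rw [show (t0 + (((m+1 : Nat)) : Int)) = (t0 + 1) + ((m : Nat) : Int) from by push_cast; ring]
        rw [← List.cons_append]
        rw [ih (t0+1) ((e, we) :: q') w hpw
          (by intro p' hp'
              rcases List.mem_cons.mp hp' with rfl | hp''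
              · refine ⟨he1, ?_⟩
                have := he.2; push_cast at this ⊢; omega
              · have h1 := htail p' hp''
                have h2 := h p' (List.mem_cons_of_mem _ hp'')
                push_cast at h2 ⊢; omega)]
        rw [List.cons_append]

-- one unfolding of A's loop body when trucks remain and the bridge is nonempty
lemma aLoop_step (bl wt : Int) (fuel : Nat) (front : Int) (rest : List Int)
    (total : Int) (rts : List Int) (tw : Int) (step : Int) :
    aLoop bl wt (fuel+1) (front :: rest) total (rts ++ [tw]) step =
      if total - front + tw > wt then
        aLoop bl wt fuel (rest ++ [0]) (total - front) (rts ++ [tw]) (step + 1)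
      else
        aLoop bl wt fuel (rest ++ [tw]) (total - front + tw) rts (step + 1) := by
  rcases rts with _ | ⟨r, rs⟩
  · simp [aLoop]
  · have hg : (r :: (rs ++ [tw])).getLast? = some tw := by
      rw [← List.cons_append, List.getLast?_concat]
    have hd : (r :: (rs ++ [tw])).dropLast = r :: rs := by
      rw [← List.cons_append, List.dropLast_concat]
    simp [aLoop, hg, hd]

lemma aLoop_done (bl wt : Int) (fuel : Nat) (bridge : List Int) (total step : Int) :
    aLoop bl wt (fuel+1) bridge total [] step = step + bl := by
  simp [aLoop]

lemma bJump_unfold (bl wt tw : Int) (q : List (Int × Int)) (total t : Int) :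
    bJump bl wt tw q total t =
      if total + tw > wt then
        match q with
        | [] => (t, [], total)
        | (e, w0) :: rest => bJump bl wt tw rest (total - w0) (e + bl)
      else (t, q, total) := by
  rw [bJump.eq_def]

-- A's dummy steps between events: while no truck exits and the next truck cannot
-- enter, the load is unchanged and time just advances.
lemma dummy_phase (n : Nat) (wt : Int) (rts : List Int) (tw : Int) :
    ∀ (d : Nat) (q : List (Int × Int)) (total s : Int) (fuel : Nat),
      (∀ p ∈ q, s - n + d ≤ p.1 ∧ p.1 ≤ s) →
      wt < total + tw →
      aLoop ((n : Int)+1) wt (fuel + d) (rep (s - n) (n+1) q) total (rts ++ [tw]) s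
        = aLoop ((n : Int)+1) wt fuel (rep (s - n + d) (n+1) q) total (rts ++ [tw]) (s + d) := by
  intro d
  induction d with
  | zero => intro q total s fuel _ _; simp
  | succ d ih =>
    intro q total s fuel hq hcond
    have hlow : ∀ p ∈ q, (s - n) + 1 ≤ p.1 := by
      intro p hp; have := (hq p hp).1; push_cast at this ⊢; omega
    rw [rep_head hlow]
    rw [show fuel + (d+1) = (fuel + d) + 1 from by ring]
    rw [aLoop_step]
    rw [if_pos (show wt < total - 0 + tw by omega)]
    rw [show total - 0 = total from by ring]
    rw [← rep_pad n (s - n + 1) q (by intro p hp; have := (hq p hp).2; push_cast; omega)]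
    rw [rep_congr (n+1) q (show s - n + 1 = (s+1) - n from by ring)]
    rw [ih q total (s+1) fuel
      (by intro p hp; have := hq p hp; push_cast at this ⊢; omega) hcond]
    rw [rep_congr (n+1) q (show (s+1) - n + (d : Int) = s - n + ((d+1 : Nat) : Int) from by push_cast; ring)]
    rw [show (s+1) + (d : Int) = s + ((d+1 : Nat) : Int) from by push_cast; ring]

-- B's jump loop matches running A until the current truck enters.
lemma jump_run (n : Nat) (wt tw : Int) (htw : tw ≤ wt) (rts : List Int) :
    ∀ (q : List (Int × Int)) (total t hi : Int),
      q.Pairwise (fun a b => a.1 < b.1) →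
      (∀ p ∈ q, t - n ≤ p.1 ∧ p.1 ≤ hi) →
      hi ≤ t - 1 →
      total = (q.map Prod.snd).sum →
      wt < total + tw →
      ∃ t2 q2 total2,
        bJump ((n : Int)+1) wt tw q total t = (t2, q2, total2) ∧
        t + 1 ≤ t2 ∧ t2 ≤ hi + ((n : Int)+1) ∧
        q2.Pairwise (fun a b => a.1 < b.1) ∧
        (∀ p ∈ q2, t2 - n ≤ p.1 ∧ p.1 ≤ hi) ∧
        total2 = (q2.map Prod.snd).sum ∧
        total2 + tw ≤ wt ∧
        ∀ fuel : Nat,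
          aLoop ((n : Int)+1) wt (fuel + (t2 - t).toNat) (rep (t - n) (n+1) q) total (rts ++ [tw]) t
            = aLoop ((n : Int)+1) wt fuel (rep (t2 - n) (n+1) (q2 ++ [(t2, tw)])) (total2 + tw) rts t2 := by
  intro q
  induction q with
  | nil =>
    intro total t hi _ _ _ hsum hcond
    simp only [List.map_nil, List.sum_nil] at hsum
    omega
  | cons p q' ihq =>
    intro total t hi hpw hq hhi hsum hcond
    obtain ⟨e1, w1⟩ := p
    have he1 : t - (n : Int) ≤ e1 ∧ e1 ≤ hi := hq (e1, w1) (List.mem_cons_self)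
    have htail : ∀ p' ∈ q', e1 < p'.1 := (List.pairwise_cons.mp hpw).1
    have hpw' := (List.pairwise_cons.mp hpw).2
    have hsum' : total - w1 = (q'.map Prod.snd).sum := by
      simp only [List.map_cons, List.sum_cons] at hsum; omega
    have hd0 : (0:Int) ≤ e1 + n - t := by omega
    set d : Nat := (e1 + (n:Int) - t).toNat with hd
    have hdi : (d : Int) = e1 + n - t := by omega
    have hunf : bJump ((n : Int)+1) wt tw ((e1, w1) :: q') total t
        = bJump ((n : Int)+1) wt tw q' (total - w1) (e1 + ((n : Int)+1)) := by
      rw [bJump_unfold]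
      rw [if_pos (show total + tw > wt from hcond)]
    by_cases hc2 : wt < (total - w1) + tw
    · -- still infeasible after the front truck exits: B pops again, A keeps stepping
      obtain ⟨t2, q2, total2, hbj, ht2l, ht2u, hq2pw, hq2b, hsum2, hfeas, hfuel⟩ :=
        ihq (total - w1) (e1 + ((n:Int)+1)) hi hpw'
          (by intro p' hp'
              have h1 := htail p' hp'
              have h2 := hq p' (List.mem_cons_of_mem _ hp')
              exact ⟨by omega, h2.2⟩)
          (by omega) hsum' hc2
      refine ⟨t2, q2, total2, by rw [hunf, hbj], by omega, by omega, hq2pw,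
        hq2b, hsum2, hfeas, ?_⟩
      intro fuel
      have hsplit : (t2 - t).toNat = ((t2 - (e1 + ((n:Int)+1))).toNat + 1) + d := by omega
      rw [hsplit]
      rw [show fuel + (((t2 - (e1 + ((n:Int)+1))).toNat + 1) + d)
            = (fuel + (t2 - (e1 + ((n:Int)+1))).toNat + 1) + d from by ring]
      rw [dummy_phase n wt rts tw d ((e1, w1) :: q') total t _
        (by intro p' hp'
            rcases List.mem_cons.mp hp' with rfl | hp''
            · exact ⟨show t - (n:Int) + (d:Int) ≤ e1 from by omega, show e1 ≤ t from by omega⟩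
            · have h1 := htail p' hp''
              have h2 := hq p' (List.mem_cons_of_mem _ hp'')
              exact ⟨by omega, by omega⟩)
        hcond]
      rw [rep_congr (n+1) ((e1, w1) :: q') (show t - (n:Int) + d = e1 from by omega)]
      rw [rep_entry]
      rw [aLoop_step]
      rw [if_pos (show wt < total - w1 + tw from hc2)]
      rw [← rep_pad n (e1 + 1) q'
        (by intro p' hp'
            have h2 := hq p' (List.mem_cons_of_mem _ hp')
            push_cast; omega)]
      rw [show t + (d : Int) + 1 = e1 + ((n:Int)+1) from by omega]
      rw [rep_congr (n+1) q' (show e1 + 1 = (e1 + ((n:Int)+1)) - n from by ring)]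
      exact hfuel fuel
    · -- the truck enters exactly when the front truck exits: t2 = e1 + n + 1
      refine ⟨e1 + ((n:Int)+1), q', total - w1, ?_, by omega, by omega, hpw',
        (by intro p' hp'
            have h1 := htail p' hp'
            have h2 := hq p' (List.mem_cons_of_mem _ hp')
            exact ⟨by omega, h2.2⟩),
        hsum', by omega, ?_⟩
      · rw [hunf, bJump_unfold]
        rw [if_neg (show ¬ (total - w1) + tw > wt from by omega)]
      · intro fuel
        have hsplit : ((e1 + ((n:Int)+1)) - t).toNat = (d + 1) := by omega
        rw [hsplit]
        rw [show fuel + (d + 1) = (fuel + 1) + d from by ring]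
        rw [dummy_phase n wt rts tw d ((e1, w1) :: q') total t _
          (by intro p' hp'
              rcases List.mem_cons.mp hp' with rfl | hp''
              · exact ⟨show t - (n:Int) + (d:Int) ≤ e1 from by omega, show e1 ≤ t from by omega⟩
              · have h1 := htail p' hp''
                have h2 := hq p' (List.mem_cons_of_mem _ hp'')
                exact ⟨by omega, by omega⟩)
          hcond]
        rw [rep_congr (n+1) ((e1, w1) :: q') (show t - (n:Int) + d = e1 from by omega)]
        rw [rep_entry]
        rw [aLoop_step]
        rw [if_neg (show ¬ wt < total - w1 + tw from hc2)]
        rw [show t + (d : Int) + 1 = e1 + ((n:Int)+1) from by omega]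
        rw [rep_congr (n+1) (q' ++ [(e1 + ((n:Int)+1), tw)])
          (show (e1 + ((n:Int)+1)) - n = e1 + 1 from by ring)]
        rw [show e1 + ((n:Int)+1) = (e1 + 1) + (n : Int) from by ring]
        rw [rep_append n (e1+1) q' tw hpw'
          (by intro p' hp'
              have h1 := htail p' hp'
              have h2 := hq p' (List.mem_cons_of_mem _ hp')
              constructor
              · omega
              · push_cast; omega)]

-- characterisation of B's drop phase under the loop invariant
lemma bDrop_keep {bl t e w : Int} {q' : List (Int × Int)} {total : Int}
    (h : ¬ e + bl ≤ t) : bDrop bl t ((e, w) :: q') total = ((e, w) :: q', total) := by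
  simp [bDrop, h]

lemma bDrop_drop {bl t e w : Int} {q' : List (Int × Int)} {total : Int}
    (h : e + bl ≤ t) : bDrop bl t ((e, w) :: q') total = bDrop bl t q' (total - w) := by
  simp [bDrop, h]

-- one truck of B's main loop = as many of A's iterations as it takes that truck to enter
lemma step_truck (n : Nat) (wt tw : Int) (htw : tw ≤ wt) (rts : List Int) :
    ∀ (q : List (Int × Int)) (total s : Int),
      q.Pairwise (fun a b => a.1 < b.1) →
      (∀ p ∈ q, s - n ≤ p.1 ∧ p.1 ≤ s) →
      total = (q.map Prod.snd).sum →
      ∃ t2 q2 total2,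
        bJump ((n : Int)+1) wt tw (bDrop ((n : Int)+1) (s+1) q total).1
            (bDrop ((n : Int)+1) (s+1) q total).2 (s+1) = (t2, q2, total2) ∧
        s + 1 ≤ t2 ∧ t2 ≤ s + ((n : Int)+1) ∧
        (q2 ++ [(t2, tw)]).Pairwise (fun a b => a.1 < b.1) ∧
        (∀ p ∈ q2 ++ [(t2, tw)], t2 - n ≤ p.1 ∧ p.1 ≤ t2) ∧
        total2 + tw = ((q2 ++ [(t2, tw)]).map Prod.snd).sum ∧
        ∀ fuel : Nat,
          aLoop ((n : Int)+1) wt (fuel + (t2 - s).toNat) (rep (s - n) (n+1) q) total (rts ++ [tw]) s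
            = aLoop ((n : Int)+1) wt fuel (rep (t2 - n) (n+1) (q2 ++ [(t2, tw)])) (total2 + tw) rts t2 := by
  intro q total s hpw hq hsum
  -- the drop phase removes at most the front truck (the slot that exits at time s+1)
  obtain ⟨q1, total1, hdrop, hpw1, hq1, hsum1, hbr⟩ :
      ∃ q1 total1, bDrop ((n : Int)+1) (s+1) q total = (q1, total1) ∧
        q1.Pairwise (fun a b => a.1 < b.1) ∧
        (∀ p ∈ q1, s - n + 1 ≤ p.1 ∧ p.1 ≤ s) ∧
        total1 = (q1.map Prod.snd).sum ∧
        rep (s - n) (n+1) q = (total - total1) :: rep (s - n + 1) n q1 := by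
    cases q with
    | nil =>
      refine ⟨[], total, rfl, by simp, by simp, by simpa using hsum, ?_⟩
      rw [rep_head (by simp)]
      simp
    | cons p q' =>
      obtain ⟨e1, w1⟩ := p
      have he1 : s - (n : Int) ≤ e1 ∧ e1 ≤ s := hq (e1, w1) (List.mem_cons_self)
      have htail : ∀ p' ∈ q', e1 < p'.1 := (List.pairwise_cons.mp hpw).1
      have hpw' := (List.pairwise_cons.mp hpw).2
      by_cases hc : e1 + ((n : Int)+1) ≤ s + 1
      · have he1eq : e1 = s - n := by omega
        refine ⟨q', total - w1, ?_, hpw', ?_, ?_, ?_⟩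
        · rw [bDrop_drop hc]
          cases q' with
          | nil => rfl
          | cons p2 q'' =>
            obtain ⟨e2, w2⟩ := p2
            have h2 : e1 < e2 := htail (e2, w2) (List.mem_cons_self)
            exact bDrop_keep (by omega)
        · intro p' hp'
          have h1 := htail p' hp'
          have h2 := hq p' (List.mem_cons_of_mem _ hp')
          exact ⟨by omega, h2.2⟩
        · simp only [List.map_cons, List.sum_cons] at hsum; omega
        · subst he1eq
          rw [rep_entry]
          congr 1
          omega
      · refine ⟨(e1, w1) :: q', total, bDrop_keep hc, hpw, ?_, hsum, ?_⟩
        · intro p' hp'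
          rcases List.mem_cons.mp hp' with rfl | hp''
          · exact ⟨show s - (n:Int) + 1 ≤ e1 from by omega, he1.2⟩
          · have h1 := htail p' hp''
            have h2 := hq p' (List.mem_cons_of_mem _ hp'')
            exact ⟨by omega, h2.2⟩
        · have hup : ∀ p' ∈ (e1, w1) :: q', s - (n:Int) + 1 ≤ p'.1 := by
            intro p' hp'
            rcases List.mem_cons.mp hp' with rfl | hp''
            · exact show s - (n:Int) + 1 ≤ e1 from by omega
            · have h1 := htail p' hp''; omega
          rw [rep_head hup]
          congr 1
          omega
    
  rw [hdrop]
  by_cases hcond : wt < total1 + tw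
  · -- the truck cannot enter at s+1: B jumps, A pads with dummy steps
    obtain ⟨t2, q2, total2, hbj, ht2l, ht2u, hq2pw, hq2b, hsum2, hfeas, hfuel⟩ :=
      jump_run n wt tw htw rts q1 total1 (s+1) s hpw1
        (by intro p' hp'; have := hq1 p' hp'; exact ⟨by omega, this.2⟩)
        (by omega) hsum1 hcond
    refine ⟨t2, q2, total2, hbj, by omega, by omega, ?_, ?_, ?_, ?_⟩
    · rw [List.pairwise_append]
      refine ⟨hq2pw, List.pairwise_singleton _ _, ?_⟩
      intro a ha b hb
      simp only [List.mem_singleton] at hb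
      subst hb
      have := hq2b a ha
      simp only
      omega
    · intro p' hp'
      rcases List.mem_append.mp hp' with hp'' | hp''
      · have := hq2b p' hp''
        exact ⟨this.1, by omega⟩
      · simp only [List.mem_singleton] at hp''
        subst hp''
        constructor
        · simp only; omega
        · simp only; omega
    · simp only [List.map_append, List.sum_append, List.map_cons, List.sum_cons,
        List.map_nil, List.sum_nil]
      omega
    · intro fuel
      have hsplit : (t2 - s).toNat = (t2 - (s+1)).toNat + 1 := by omega
      rw [hsplit]
      rw [show fuel + ((t2 - (s+1)).toNat + 1) = (fuel + (t2 - (s+1)).toNat) + 1 from by ring]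
      rw [hbr]
      rw [aLoop_step]
      rw [if_pos (show wt < total - (total - total1) + tw from by omega)]
      rw [show total - (total - total1) = total1 from by ring]
      rw [← rep_pad n (s - n + 1) q1
        (by intro p' hp'; have := (hq1 p' hp').2; push_cast; omega)]
      rw [rep_congr (n+1) q1 (show s - n + 1 = (s+1) - n from by ring)]
      exact hfuel fuel
  · -- the truck enters immediately at time s+1
    refine ⟨s+1, q1, total1, ?_, by omega, by omega, ?_, ?_, ?_, ?_⟩
    · rw [bJump_unfold]
      rw [if_neg (show ¬ total1 + tw > wt from by omega)]
    · rw [List.pairwise_append]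
      refine ⟨hpw1, List.pairwise_singleton _ _, ?_⟩
      intro a ha b hb
      simp only [List.mem_singleton] at hb
      subst hb
      have := hq1 a ha
      simp only
      omega
    · intro p' hp'
      rcases List.mem_append.mp hp' with hp'' | hp''
      · have := hq1 p' hp''
        exact ⟨by omega, by omega⟩
      · simp only [List.mem_singleton] at hp''
        subst hp''
        exact ⟨by simp only; omega, by simp only; omega⟩
    · simp only [List.map_append, List.sum_append, List.map_cons, List.sum_cons,
        List.map_nil, List.sum_nil]
      omega
    · intro fuel
      have hsplit : ((s+1) - s).toNat = 1 := by omega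
      rw [hsplit]
      rw [hbr]
      rw [aLoop_step]
      rw [if_neg (show ¬ wt < total - (total - total1) + tw from by omega)]
      rw [show total - (total - total1) = total1 from by ring]
      rw [rep_congr (n+1) (q1 ++ [(s+1, tw)]) (show (s+1) - (n:Int) = (s - n + 1) from by ring)]
      rw [show ((s:Int)+1) = (s - (n:Int) + 1) + (n : Int) from by ring]
      rw [rep_append n (s - n + 1) q1 tw hpw1
        (by intro p' hp'
            have h2 := hq1 p' hp'
            exact ⟨by omega, by push_cast; omega⟩)]

-- the main loops agree truck by truck
lemma main_loop (n : Nat) (wt : Int) :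
    ∀ (rem : List Int) (q : List (Int × Int)) (total s : Int) (fuel : Nat),
      (∀ x ∈ rem, x ≤ wt) →
      q.Pairwise (fun a b => a.1 < b.1) →
      (∀ p ∈ q, s - n ≤ p.1 ∧ p.1 ≤ s) →
      total = (q.map Prod.snd).sum →
      rem.length * (n+1) + 1 ≤ fuel →
      aLoop ((n : Int)+1) wt fuel (rep (s - n) (n+1) q) total rem.reverse s
        = bLoop ((n : Int)+1) wt rem q total s := by
  intro rem
  induction rem with
  | nil =>
    intro q total s fuel _ _ _ _ hfuel
    match fuel, hfuel with
    | fuel+1, _ =>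
      rw [List.reverse_nil, aLoop_done, bLoop]
  | cons tw rest ih =>
    intro q total s fuel hwts hpw hq hsum hfuel
    obtain ⟨t2, q2, total2, hbj, ht2l, ht2u, hq2pw, hq2b, hsum2, hfuelstep⟩ :=
      step_truck n wt tw (hwts tw (List.mem_cons_self)) rest.reverse q total s hpw hq hsum
    have hmul : (tw :: rest).length * (n+1) = rest.length * (n+1) + (n+1) := by
      simp [List.length_cons, Nat.succ_mul]
    have hc1 : 1 ≤ (t2 - s).toNat := by omega
    have hcn : (t2 - s).toNat ≤ n + 1 := by omega
    have hcf : (t2 - s).toNat ≤ fuel := by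
      rw [hmul] at hfuel; omega
    rw [List.reverse_cons]
    rw [show fuel = (fuel - (t2 - s).toNat) + (t2 - s).toNat from by omega]
    rw [hfuelstep (fuel - (t2 - s).toNat)]
    rw [ih (q2 ++ [(t2, tw)]) (total2 + tw) t2 (fuel - (t2 - s).toNat)
      (by intro x hx; exact hwts x (List.mem_cons_of_mem _ hx))
      hq2pw hq2b hsum2
      (by rw [hmul] at hfuel; omega)]
    rw [bLoop]
    simp only [hbj]

-- ===== VERDICT (by name: the statement is the Claim_ definition above) =====
theorem solution_spec : Claim_equal_solution := by
  intro bl wt tws _hdom hpre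
  unfold Spec_solution
  rcases tws with _ | ⟨tw0, tws'⟩
  · simp [solution, solution_alt, aLoop, bLoop]
  · have hbl : 1 ≤ bl := by
      rcases hpre.1 with h | h
      · exact absurd h (by simp)
      · exact h
    set n : Nat := (bl - 1).toNat with hn
    have hbln : bl = (n : Int) + 1 := by omega
    have htn : bl.toNat = n + 1 := by omega
    unfold solution solution_alt
    rw [htn, hbln]
    rw [show List.replicate (n+1) (0:Int) = rep ((0:Int) - n) (n+1) [] from (rep_nil (n+1) _).symm]
    rw [main_loop n wt (tw0 :: tws') [] 0 0 ((tw0 :: tws').length * (n+1) + 1)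
      hpre.2 (by simp) (by simp) (by simp) (le_refl _)]
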